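-- pv_equiv track=rewrite | github.com/trofik00777/EgeInformatics | ex25/25_3982(1).py | f
-- ===== SOURCE A (Python) =====
-- def f(a):
--     numb = a
--     n = m = 0
--     while numb % 14 == 0:
--         n += 1
--         m += 1
--         numb //= 14
--     if numb % 2 == 0:
--         if m % 2 == 0:
--             while numb % 2 == 0:
--                 n += 1
--                 numb //= 2
--             if numb == 1 and n % 2 != 0:
--                 return True
--         return False
--     elif numb % 7 == 0:
--         if n % 2 != 0:
--             while numb % 7 == 0:
--                 m += 1
--                 numb //= 7
--             if numb == 1 and m % 2 == 0:
--                 return True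
--         return False
--     return False
-- ===== SOURCE B (Python) =====
-- def f(a):
--     def go(numb, p, q):
--         if numb % 2 == 0:
--             return go(numb // 2, p + 1, q)
--         if numb % 7 == 0:
--             return go(numb // 7, p, q + 1)
--         return numb == 1 and p % 2 == 1 and q % 2 == 0
--     return go(a, 0, 0)
-- ===== Notes on version B (the rewrite author's own statement) =====
-- stated objective: simpler
-- what changed: B replaces A's lockstep divide-by-14 loop and its nested parity branches by one recursive accumulator pass that strips factors of 2 and 7 while counting them, then checks 'remainder is 1, exponent of 2 odd, exponent of 7 even'.
import Mathlib
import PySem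

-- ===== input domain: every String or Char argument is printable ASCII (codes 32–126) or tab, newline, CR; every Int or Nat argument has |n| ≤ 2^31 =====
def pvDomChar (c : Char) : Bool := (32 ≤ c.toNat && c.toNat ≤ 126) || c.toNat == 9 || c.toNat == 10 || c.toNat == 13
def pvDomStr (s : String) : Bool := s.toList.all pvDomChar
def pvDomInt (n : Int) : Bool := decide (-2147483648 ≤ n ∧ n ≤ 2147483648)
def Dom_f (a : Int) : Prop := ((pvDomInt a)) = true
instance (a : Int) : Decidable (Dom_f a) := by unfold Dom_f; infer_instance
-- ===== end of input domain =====

-- B replaces A's lockstep divide-by-14 loop and nested parity branches by ONE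
-- recursive accumulator pass stripping factors of 2 and 7 (objective: simpler).
-- Both Pythons fail to terminate on a = 0, which Pre_f excludes.

-- termination helper shared by both ports' recursions (totality only)
lemma natAbs_floordiv_lt (d x : Int) (hd : 2 ≤ d) (hx : x ≠ 0)
    (hm : PySem.Int.mod x d = 0) :
    (PySem.Int.floordiv x d).natAbs < x.natAbs := by
  rcases (PySem.Int.mod_eq_zero_iff_dvd x d).mp hm with ⟨c, hc⟩
  subst hc
  rw [PySem.Int.floordiv_eq_ediv_of_pos (by omega), Int.mul_ediv_cancel_left c (by omega : d ≠ 0)]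
  have hc0 : c ≠ 0 := by rintro rfl; exact hx (by ring)
  have h1 : 2 ≤ d.natAbs := by omega
  have h2 : 1 ≤ c.natAbs := Int.natAbs_pos.mpr hc0
  calc c.natAbs < 2 * c.natAbs := by omega
    _ ≤ d.natAbs * c.natAbs := Nat.mul_le_mul_right _ h1
    _ = (d * c).natAbs := (Int.natAbs_mul d c).symm

-- ===== PORT A =====
-- A's 'while numb % d == 0' loops, one per divisor, each returning the remaining
-- number and the loop count; '2 ≤ d ∧ x ≠ 0' in the guard is a totality guard only
-- (A calls it with d ∈ {2,7,14} and, under Pre_f, x ≠ 0, where Python's guard agrees).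
def divloop (d x : Int) : Int × Nat :=
  if h : 2 ≤ d ∧ x ≠ 0 ∧ PySem.Int.mod x d = 0 then
    let r := divloop d (PySem.Int.floordiv x d)
    (r.1, r.2 + 1)
  else (x, 0)
termination_by x.natAbs
decreasing_by exact natAbs_floordiv_lt d x h.1 h.2.1 h.2.2

-- A's first loop increments n and m in lockstep, so after it n = m = k (the loop count).
def f (a : Int) : Bool :=
  let l14 := divloop 14 a
  let numb := l14.1
  let k := l14.2
  if PySem.Int.mod numb 2 = 0 then
    if k % 2 = 0 then
      let l2 := divloop 2 numb
      decide (l2.1 = 1 ∧ (k + l2.2) % 2 ≠ 0)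
    else false
  else if PySem.Int.mod numb 7 = 0 then
    if k % 2 ≠ 0 then
      let l7 := divloop 7 numb
      decide (l7.1 = 1 ∧ (k + l7.2) % 2 = 0)
    else false
  else false

-- ===== PORT B =====
-- B's inner recursive helper 'go(numb, p, q)'; the 'numb ≠ 0' conjuncts are totality
-- guards only (under Pre_f every reached numb is nonzero, where Python's tests agree).
def fAltGo (numb : Int) (p q : Nat) : Bool :=
  if h2 : numb ≠ 0 ∧ PySem.Int.mod numb 2 = 0 then
    fAltGo (PySem.Int.floordiv numb 2) (p + 1) q
  else if h7 : numb ≠ 0 ∧ PySem.Int.mod numb 7 = 0 then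
    fAltGo (PySem.Int.floordiv numb 7) p (q + 1)
  else decide (numb = 1 ∧ p % 2 = 1 ∧ q % 2 = 0)
termination_by numb.natAbs
decreasing_by
  · exact natAbs_floordiv_lt 2 numb (by norm_num) h2.1 h2.2
  · exact natAbs_floordiv_lt 7 numb (by norm_num) h7.1 h7.2

def f_alt (a : Int) : Bool := fAltGo a 0 0

-- ===== PRECONDITION & SPEC =====
-- Pre_f excludes only a = 0, on which the Python A (and B) fails to terminate.
def Pre_f (a : Int) : Prop := a ≠ 0
instance (a : Int) : Decidable (Pre_f a) := by unfold Pre_f; infer_instance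
def pvWitness_f : Int := 2
def Spec_f (a : Int) (out : Bool) : Prop := out = f_alt a
instance (a : Int) (out : Bool) : Decidable (Spec_f a out) := by unfold Spec_f; infer_instance

-- ===== CLAIM (what is proved, stated in full; the proofs are below) =====
def Claim_equal_f : Prop := ∀ (a : Int), Dom_f a → Pre_f a → Spec_f a (f a)

-- ===== LEMMAS AND PROOFS =====

lemma divloop_pos (d x : Int) (h : 2 ≤ d ∧ x ≠ 0 ∧ PySem.Int.mod x d = 0) :
    divloop d x = ((divloop d (PySem.Int.floordiv x d)).1,
                   (divloop d (PySem.Int.floordiv x d)).2 + 1) := by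
  rw [divloop, dif_pos h]

lemma divloop_stop (d x : Int) (h : ¬(2 ≤ d ∧ x ≠ 0 ∧ PySem.Int.mod x d = 0)) :
    divloop d x = (x, 0) := by
  rw [divloop, dif_neg h]

lemma floordiv_pow_mul (d : Int) (hd : 2 ≤ d) (k : Nat) (r : Int) :
    PySem.Int.floordiv (d ^ (k + 1) * r) d = d ^ k * r := by
  rw [PySem.Int.floordiv_eq_ediv_of_pos (by omega)]
  have hrw : d ^ (k + 1) * r = d * (d ^ k * r) := by ring
  rw [hrw, Int.mul_ediv_cancel_left _ (by omega : d ≠ 0)]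

-- divloop computes (r, k) exactly when x = d^k * r with d not dividing r
lemma divloop_eq (d r : Int) (k : Nat) (hd : 2 ≤ d) (hr : r ≠ 0) (hnd : ¬ d ∣ r) :
    divloop d (d ^ k * r) = (r, k) := by
  induction k with
  | zero =>
      simp only [pow_zero, one_mul]
      exact divloop_stop d r (fun h => hnd ((PySem.Int.mod_eq_zero_iff_dvd r d).mp h.2.2))
  | succ k ih =>
      have hx : d ^ (k + 1) * r ≠ 0 := mul_ne_zero (by positivity) hr
      have hdvd : d ∣ d ^ (k + 1) * r := ⟨d ^ k * r, by ring⟩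
      rw [divloop_pos d _ ⟨hd, hx, (PySem.Int.mod_eq_zero_iff_dvd _ d).mpr hdvd⟩,
        floordiv_pow_mul d hd k r, ih]

lemma divloop_spec (d x : Int) (hd : 2 ≤ d) :
    x ≠ 0 → x = d ^ (divloop d x).2 * (divloop d x).1 ∧
      ¬ d ∣ (divloop d x).1 ∧ (divloop d x).1 ≠ 0 := by
  induction x using divloop.induct d with
  | case1 x h ih =>
      intro _
      rcases h with ⟨-, hx0, hm⟩
      rcases (PySem.Int.mod_eq_zero_iff_dvd x d).mp hm with ⟨c, hc⟩
      have hq : PySem.Int.floordiv x d = c := by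
        rw [hc, PySem.Int.floordiv_eq_ediv_of_pos (by omega),
          Int.mul_ediv_cancel_left c (by omega : d ≠ 0)]
      have hc0 : c ≠ 0 := by rintro rfl; exact hx0 (by rw [hc]; ring)
      rw [hq] at ih
      obtain ⟨ih1, ih2, ih3⟩ := ih hc0
      rw [divloop_pos d x ⟨hd, hx0, hm⟩, hq]
      refine ⟨?_, ih2, ih3⟩
      rw [hc]
      conv_lhs => rw [ih1]
      ring
  | case2 x h =>
      intro hx
      rw [divloop_stop d x h]
      refine ⟨by simp, ?_, hx⟩
      intro hdvd
      exact h ⟨hd, hx, (PySem.Int.mod_eq_zero_iff_dvd x d).mpr hdvd⟩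

lemma prime7 : Prime (7 : ℤ) := by
  rw [Int.prime_iff_natAbs_prime]; norm_num

lemma not_dvd_pow_mul {p b r : Int} (hp : Prime p) (hpb : ¬ p ∣ b) (hpr : ¬ p ∣ r) (q : Nat) :
    ¬ p ∣ b ^ q * r := by
  intro h
  rcases hp.dvd_mul.mp h with h | h
  · exact hpb (hp.dvd_of_dvd_pow h)
  · exact hpr h

lemma fAltGo_two (x : Int) (p q : Nat) (h : x ≠ 0 ∧ PySem.Int.mod x 2 = 0) :
    fAltGo x p q = fAltGo (PySem.Int.floordiv x 2) (p + 1) q := by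
  rw [fAltGo, dif_pos h]

lemma fAltGo_seven (x : Int) (p q : Nat) (h2 : ¬(x ≠ 0 ∧ PySem.Int.mod x 2 = 0))
    (h7 : x ≠ 0 ∧ PySem.Int.mod x 7 = 0) :
    fAltGo x p q = fAltGo (PySem.Int.floordiv x 7) p (q + 1) := by
  rw [fAltGo, dif_neg h2, dif_pos h7]

lemma fAltGo_stop (x : Int) (p q : Nat) (h2 : ¬(x ≠ 0 ∧ PySem.Int.mod x 2 = 0))
    (h7 : ¬(x ≠ 0 ∧ PySem.Int.mod x 7 = 0)) :
    fAltGo x p q = decide (x = 1 ∧ p % 2 = 1 ∧ q % 2 = 0) := by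
  rw [fAltGo, dif_neg h2, dif_neg h7]

-- B's recursion on 7^q * r (r free of 2 and 7) counts the q sevens into the accumulator
lemma go_sevens (q : Nat) (r : Int) (hr : r ≠ 0) (h2 : ¬ (2:ℤ) ∣ r) (h7 : ¬ (7:ℤ) ∣ r) :
    ∀ p0 q0 : Nat, fAltGo (7 ^ q * r) p0 q0 = decide (r = 1 ∧ p0 % 2 = 1 ∧ (q0 + q) % 2 = 0) := by
  induction q with
  | zero =>
      intro p0 q0
      simp only [pow_zero, one_mul]
      rw [fAltGo_stop r p0 q0
        (fun h => h2 ((PySem.Int.mod_eq_zero_iff_dvd r 2).mp h.2))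
        (fun h => h7 ((PySem.Int.mod_eq_zero_iff_dvd r 7).mp h.2)), decide_eq_decide]
      omega
  | succ q ih =>
      intro p0 q0
      have hx : (7:ℤ) ^ (q + 1) * r ≠ 0 := mul_ne_zero (by positivity) hr
      have hm2 : ¬ PySem.Int.mod ((7:ℤ) ^ (q + 1) * r) 2 = 0 := by
        rw [PySem.Int.mod_eq_zero_iff_dvd]
        exact not_dvd_pow_mul Int.prime_two (by decide) h2 _
      have hm7 : PySem.Int.mod ((7:ℤ) ^ (q + 1) * r) 7 = 0 := by
        rw [PySem.Int.mod_eq_zero_iff_dvd]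
        exact ⟨7 ^ q * r, by ring⟩
      rw [fAltGo_seven _ p0 q0 (fun h => hm2 h.2) ⟨hx, hm7⟩,
        floordiv_pow_mul 7 (by norm_num) q r, ih p0 (q0 + 1), decide_eq_decide]
      omega

-- B's recursion on 2^p * 7^q * r first counts the p twos, then falls into go_sevens
lemma go_full (p q : Nat) (r : Int) (hr : r ≠ 0) (h2 : ¬ (2:ℤ) ∣ r) (h7 : ¬ (7:ℤ) ∣ r) :
    ∀ p0 q0 : Nat, fAltGo (2 ^ p * (7 ^ q * r)) p0 q0 =
      decide (r = 1 ∧ (p0 + p) % 2 = 1 ∧ (q0 + q) % 2 = 0) := by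
  induction p with
  | zero =>
      intro p0 q0
      simp only [pow_zero, one_mul]
      rw [go_sevens q r hr h2 h7 p0 q0, decide_eq_decide]
      omega
  | succ p ih =>
      intro p0 q0
      have hx : (2:ℤ) ^ (p + 1) * (7 ^ q * r) ≠ 0 :=
        mul_ne_zero (by positivity) (mul_ne_zero (by positivity) hr)
      have hm2 : PySem.Int.mod ((2:ℤ) ^ (p + 1) * (7 ^ q * r)) 2 = 0 := by
        rw [PySem.Int.mod_eq_zero_iff_dvd]
        exact ⟨2 ^ p * (7 ^ q * r), by ring⟩
      rw [fAltGo_two _ p0 q0 ⟨hx, hm2⟩, floordiv_pow_mul 2 (by norm_num) p _,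
        ih (p0 + 1) q0, decide_eq_decide]
      omega

-- the key pointwise computation: on a = 2^p * 7^q * r with r free of 2 and 7, both
-- ports evaluate to decide (r = 1 ∧ p odd ∧ q even)
lemma key (p q : Nat) (r : Int) (hr : r ≠ 0) (h2 : ¬ (2:ℤ) ∣ r) (h7 : ¬ (7:ℤ) ∣ r) :
    f (2 ^ p * 7 ^ q * r) = f_alt (2 ^ p * 7 ^ q * r) := by
  have hBalt : f_alt (2 ^ p * 7 ^ q * r) = decide (r = 1 ∧ p % 2 = 1 ∧ q % 2 = 0) := by
    show fAltGo _ 0 0 = _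
    rw [mul_assoc, go_full p q r hr h2 h7 0 0, decide_eq_decide]
    omega
  rw [hBalt]
  rcases Nat.lt_trichotomy p q with hlt | heq | hgt
  · -- p < q : the 14-loop runs p times, leaving 7^(q-p) * r (odd, divisible by 7)
    have hs : (2:ℤ) ^ p * 7 ^ q * r = 14 ^ p * (7 ^ (q - p) * r) := by
      have h14 : (14:ℤ) = 2 * 7 := by norm_num
      have hq2 : q = p + (q - p) := by omega
      rw [h14, mul_pow]
      conv_lhs => rw [hq2]
      rw [pow_add]; ring
    have hsne : (7:ℤ) ^ (q - p) * r ≠ 0 := mul_ne_zero (by positivity) hr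
    have hnd : ¬ (14:ℤ) ∣ 7 ^ (q - p) * r := fun hdvd =>
      not_dvd_pow_mul Int.prime_two (by decide) h2 (q - p) (dvd_trans (by norm_num) hdvd)
    have h14e : divloop 14 (2 ^ p * 7 ^ q * r) = (7 ^ (q - p) * r, p) := by
      rw [hs]; exact divloop_eq 14 _ p (by norm_num) hsne hnd
    have hm2 : ¬ PySem.Int.mod (7 ^ (q - p) * r) 2 = 0 := by
      rw [PySem.Int.mod_eq_zero_iff_dvd]
      exact not_dvd_pow_mul Int.prime_two (by decide) h2 _
    have hm7 : PySem.Int.mod (7 ^ (q - p) * r) 7 = 0 := by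
      rw [PySem.Int.mod_eq_zero_iff_dvd]
      exact dvd_mul_of_dvd_left (dvd_pow_self 7 (by omega)) r
    have h7e : divloop 7 (7 ^ (q - p) * r) = (r, q - p) :=
      divloop_eq 7 r (q - p) (by norm_num) hr h7
    have hA : f (2 ^ p * 7 ^ q * r) =
        (if p % 2 ≠ 0 then decide (r = 1 ∧ (p + (q - p)) % 2 = 0) else false) := by
      simp only [f, h14e]
      rw [if_neg hm2, if_pos hm7]
      simp only [h7e]
    rw [hA]
    by_cases hp : p % 2 = 0
    · rw [if_neg (by omega)]
      have hno : ¬ (r = 1 ∧ p % 2 = 1 ∧ q % 2 = 0) := by omega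
      simp [hno]
    · rw [if_pos hp, decide_eq_decide]
      omega
  · -- p = q : the 14-loop removes everything, leaving r (coprime to 2 and 7)
    have hs : (2:ℤ) ^ p * 7 ^ q * r = 14 ^ p * r := by
      have h14 : (14:ℤ) = 2 * 7 := by norm_num
      rw [h14, mul_pow, ← heq]
    have hnd : ¬ (14:ℤ) ∣ r := fun hdvd => h2 (dvd_trans (by norm_num) hdvd)
    have h14e : divloop 14 (2 ^ p * 7 ^ q * r) = (r, p) := by
      rw [hs]; exact divloop_eq 14 r p (by norm_num) hr hnd
    have hm2 : ¬ PySem.Int.mod r 2 = 0 := by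
      rw [PySem.Int.mod_eq_zero_iff_dvd]; exact h2
    have hm7 : ¬ PySem.Int.mod r 7 = 0 := by
      rw [PySem.Int.mod_eq_zero_iff_dvd]; exact h7
    have hA : f (2 ^ p * 7 ^ q * r) = false := by
      simp only [f, h14e]
      rw [if_neg hm2, if_neg hm7]
    rw [hA]
    have hno : ¬ (r = 1 ∧ p % 2 = 1 ∧ q % 2 = 0) := by omega
    simp [hno]
  · -- q < p : the 14-loop runs q times, leaving 2^(p-q) * r (even)
    have hs : (2:ℤ) ^ p * 7 ^ q * r = 14 ^ q * (2 ^ (p - q) * r) := by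
      have h14 : (14:ℤ) = 2 * 7 := by norm_num
      have hp2 : p = q + (p - q) := by omega
      rw [h14, mul_pow]
      conv_lhs => rw [hp2]
      rw [pow_add]; ring
    have hsne : (2:ℤ) ^ (p - q) * r ≠ 0 := mul_ne_zero (by positivity) hr
    have hnd : ¬ (14:ℤ) ∣ 2 ^ (p - q) * r := fun hdvd =>
      not_dvd_pow_mul prime7 (by decide) h7 (p - q) (dvd_trans (by norm_num) hdvd)
    have h14e : divloop 14 (2 ^ p * 7 ^ q * r) = (2 ^ (p - q) * r, q) := by
      rw [hs]; exact divloop_eq 14 _ q (by norm_num) hsne hnd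
    have hm2 : PySem.Int.mod (2 ^ (p - q) * r) 2 = 0 := by
      rw [PySem.Int.mod_eq_zero_iff_dvd]
      exact dvd_mul_of_dvd_left (dvd_pow_self 2 (by omega)) r
    have h2e : divloop 2 (2 ^ (p - q) * r) = (r, p - q) :=
      divloop_eq 2 r (p - q) (by norm_num) hr h2
    have hA : f (2 ^ p * 7 ^ q * r) =
        (if q % 2 = 0 then decide (r = 1 ∧ (q + (p - q)) % 2 ≠ 0) else false) := by
      simp only [f, h14e]
      rw [if_pos hm2]
      simp only [h2e]
    rw [hA]
    by_cases hq0 : q % 2 = 0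
    · rw [if_pos hq0, decide_eq_decide]
      omega
    · rw [if_neg hq0]
      have hno : ¬ (r = 1 ∧ p % 2 = 1 ∧ q % 2 = 0) := by omega
      simp [hno]

-- ===== VERDICT (by name: the statement is the Claim_ definition above) =====
theorem f_spec : Claim_equal_f := by
  intro a _ ha
  unfold Spec_f
  obtain ⟨e2, hd2, hn2⟩ := divloop_spec 2 a (by norm_num) ha
  obtain ⟨e7, hd7, hn7⟩ := divloop_spec 7 _ (by norm_num) hn2
  have h2r : ¬ (2:ℤ) ∣ (divloop 7 (divloop 2 a).1).1 := fun h => hd2 (by rw [e7]; exact h.mul_left _)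
  have hrw : a = 2 ^ (divloop 2 a).2 * 7 ^ (divloop 7 (divloop 2 a).1).2 *
      (divloop 7 (divloop 2 a).1).1 := by
    rw [mul_assoc, ← e7, ← e2]
  rw [hrw]
  exact key _ _ _ hn7 h2r hd7
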